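-- pv_equiv track=rewrite | github.com/scatterfish/advent-of-code-2018 | solutions/02-inventory-management-system-PYTHON/main.py | check_for_count
-- ===== SOURCE A (Python) =====
-- def check_for_count(string, num):
-- 	unique_letters = []
-- 	for l in string:
-- 		if not l in unique_letters:
-- 			unique_letters.append(l)
-- 	for u in unique_letters:
-- 		count = string.count(u)
-- 		if count == num:
-- 			return True
-- 	return False
-- ===== SOURCE B (Python) =====
-- def check_for_count(string, num):
-- 	s = sorted(string)
-- 	while s:
-- 		c = s[0]
-- 		run = 1
-- 		while run < len(s) and s[run] == c:
-- 			run += 1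
-- 		if run == num:
-- 			return True
-- 		s = s[run:]
-- 	return False
-- ===== Notes on version B (the rewrite author's own statement) =====
-- stated objective: alternative
-- what changed: Replaced A's ordered distinct-letter collection (membership scan per character) followed by a str.count scan per distinct letter with a single pass over the sorted character list that measures each run of equal characters and compares its length to num.
import Mathlib
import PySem

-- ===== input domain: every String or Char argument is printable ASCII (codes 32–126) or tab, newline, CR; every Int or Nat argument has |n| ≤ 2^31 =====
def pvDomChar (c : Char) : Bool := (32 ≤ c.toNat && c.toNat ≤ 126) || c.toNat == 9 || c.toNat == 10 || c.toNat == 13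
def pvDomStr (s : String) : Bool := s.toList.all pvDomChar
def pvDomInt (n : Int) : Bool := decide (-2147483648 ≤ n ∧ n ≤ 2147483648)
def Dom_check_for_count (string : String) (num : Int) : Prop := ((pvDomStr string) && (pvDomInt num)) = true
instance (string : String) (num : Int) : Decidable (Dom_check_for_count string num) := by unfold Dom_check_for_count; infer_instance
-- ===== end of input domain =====

-- B replaces A's distinct-letter collection plus repeated string.count scans by one
-- run-scan over the sorted character list (objective: alternative algorithm; not timed faster).

-- ===== PORT A =====
-- literal port: build unique_letters by an append-if-absent loop, then scan it with str.count
def check_for_count (string : String) (num : Int) : Bool :=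
  let unique_letters := string.toList.foldl
    (fun acc l => if ¬ (l ∈ acc) then acc ++ [l] else acc) []
  unique_letters.any (fun u => ((PySem.Str.count string (String.ofList [u]) : Int) == num))

-- ===== PORT B =====
-- the 'while s: … s = s[run:]' loop of Source B: run = 1 + length of the leading equal run of the tail
def pvRunScan (num : Int) : List Char → Bool
  | [] => false
  | c :: rest =>
    if ((1 + (rest.takeWhile (fun x => x == c)).length : Int) == num) then true
    else pvRunScan num (rest.dropWhile (fun x => x == c))
termination_by s => s.length
decreasing_by
  exact Nat.lt_succ_of_le (List.length_dropWhile_le _ _)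

def check_for_count_alt (string : String) (num : Int) : Bool :=
  pvRunScan num (PySem.List.sorted string.toList (fun x => x) false)

-- ===== PRECONDITION & SPEC =====
def Spec_check_for_count (string : String) (num : Int) (out : Bool) : Prop := out = check_for_count_alt string num
instance (string : String) (num : Int) (out : Bool) : Decidable (Spec_check_for_count string num out) := by unfold Spec_check_for_count; infer_instance

-- ===== CLAIM (what is proved, stated in full; the proofs are below) =====
def Claim_equal_check_for_count : Prop := ∀ (string : String) (num : Int), Dom_check_for_count string num → Spec_check_for_count string num (check_for_count string num)

-- ===== LEMMAS AND PROOFS =====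

-- str.count with a single-character needle is the per-character count
theorem pvCountGo_singleton (c : Char) (l : List Char) (acc fuel : Nat)
    (h : l.length ≤ fuel) :
    PySem.Chars.count.go [c] fuel l acc = acc + l.count c := by
  induction l generalizing fuel acc with
  | nil => cases fuel <;> simp [PySem.Chars.count.go]
  | cons hd t ih =>
    cases fuel with
    | zero => simp at h
    | succ f =>
      have ht : t.length ≤ f := by simpa using h
      by_cases hc : hd = c
      · subst hc
        simp [PySem.Chars.count.go, List.isPrefixOf, ih _ _ ht]
        omega
      · have : (c == hd) = false := by simp; exact fun e => hc e.symm
        simp [PySem.Chars.count.go, List.isPrefixOf, this, ih _ _ ht, hc]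

theorem pvCount_singleton (s : String) (c : Char) :
    PySem.Str.count s (String.ofList [c]) = s.toList.count c := by
  rw [PySem.Str.count_eq]
  have h1 : (String.ofList [c]).toList = [c] := by simp
  rw [h1]
  rw [show PySem.Chars.count s.toList [c] = PySem.Chars.count.go [c] s.toList.length s.toList 0
      from by simp [PySem.Chars.count]]
  simpa using pvCountGo_singleton c s.toList 0 s.toList.length le_rfl

-- membership in A's unique_letters fold
theorem pvMemUniqueFold (l : List Char) (acc : List Char) (x : Char) :
    x ∈ l.foldl (fun acc l => if ¬ (l ∈ acc) then acc ++ [l] else acc) acc ↔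
      x ∈ acc ∨ x ∈ l := by
  induction l generalizing acc with
  | nil => simp
  | cons h t ih =>
    simp only [List.foldl_cons]
    by_cases hm : h ∈ acc
    · rw [if_neg (not_not_intro hm), ih]
      constructor
      · tauto
      · rintro (h1 | h2)
        · exact Or.inl h1
        · rcases List.mem_cons.1 h2 with rfl | h3
          · exact Or.inl hm
          · exact Or.inr h3
    · rw [if_pos hm, ih]
      simp only [List.mem_append, List.mem_cons]
      tauto

-- A is true iff some character of the string occurs exactly num times
theorem pvA_iff (s : String) (num : Int) :
    check_for_count s num = true ↔
      ∃ c ∈ s.toList, (s.toList.count c : Int) = num := by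
  simp only [check_for_count, List.any_eq_true, pvCount_singleton, beq_iff_eq]
  constructor
  · rintro ⟨u, hu, h⟩
    exact ⟨u, (pvMemUniqueFold _ [] u).1 hu |>.resolve_left (by simp), h⟩
  · rintro ⟨u, hu, h⟩
    exact ⟨u, (pvMemUniqueFold _ [] u).2 (Or.inr hu), h⟩

-- in a sorted list, everything after the leading equal run differs from the head
theorem pvDropWhile_ne (c : Char) (rest : List Char)
    (hs : (c :: rest).Pairwise (· ≤ ·)) :
    ∀ x ∈ rest.dropWhile (fun x => x == c), x ≠ c := by
  intro x hx
  cases hdm : rest.dropWhile (fun x => x == c) with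
  | nil => rw [hdm] at hx; simp at hx
  | cons h0 dtl =>
    rw [hdm] at hx
    have hh0 : (h0 == c) = false := by
      have := List.head?_dropWhile_not (fun x => x == c) rest
      rw [hdm] at this; simpa using this
    have hh0ne : h0 ≠ c := by simpa using hh0
    have hrest := (List.pairwise_cons.1 hs).2
    have hcle := (List.pairwise_cons.1 hs).1
    have hdsub : (rest.dropWhile (fun x => x == c)).Sublist rest := List.dropWhile_sublist _
    rw [hdm] at hdsub
    have hdp : (h0 :: dtl).Pairwise (· ≤ ·) := hrest.sublist hdsub
    have hch0 : c < h0 := lt_of_le_of_ne (hcle h0 (hdsub.mem (by simp))) (Ne.symm hh0ne)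
    rcases List.mem_cons.1 hx with rfl | hx'
    · exact hh0ne
    · exact ne_of_gt (lt_of_lt_of_le hch0 ((List.pairwise_cons.1 hdp).1 x hx'))

-- B's run scan on a sorted list is true iff some element occurs exactly num times
theorem pvB_iff_aux (num : Int) : ∀ (n : Nat) (l : List Char), l.length ≤ n →
    l.Pairwise (· ≤ ·) →
    (pvRunScan num l = true ↔ ∃ c ∈ l, (l.count c : Int) = num) := by
  intro n
  induction n with
  | zero =>
    intro l hl _
    have : l = [] := List.eq_nil_of_length_eq_zero (Nat.le_zero.1 hl)
    subst this; simp [pvRunScan]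
  | succ n ihn =>
    intro l hl hs
    match l with
    | [] => simp [pvRunScan]
    | c :: rest =>
      have hsplit : rest.takeWhile (fun x => x == c) ++ rest.dropWhile (fun x => x == c) = rest :=
        List.takeWhile_append_dropWhile
      set t := rest.takeWhile (fun x => x == c) with ht
      set d := rest.dropWhile (fun x => x == c) with hd
      -- every element of t equals c
      have hteq : ∀ x ∈ t, x = c := by
        intro x hx
        have := List.mem_takeWhile_imp hx
        simpa [beq_iff_eq] using this
      -- every element of d differs from c
      have hdne : ∀ x ∈ d, x ≠ c := by rw [hd]; exact pvDropWhile_ne c rest hs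
      have hcount_c : (c :: rest).count c = 1 + t.length := by
        rw [← hsplit]
        have h1 : t.count c = t.length := List.count_eq_length.2 (fun x hx => by simp [hteq x hx])
        have h2 : d.count c = 0 := List.count_eq_zero.2 (fun hmem => hdne c hmem rfl)
        simp [List.count_append, h1, h2]
        omega
      have hcount_d : ∀ x ∈ d, (c :: rest).count x = d.count x := by
        intro x hx
        rw [← hsplit]
        have h1 : t.count x = 0 := List.count_eq_zero.2 (fun hmem => hdne x hx (hteq x hmem))
        simp [List.count_append, h1, Ne.symm (hdne x hx)]
      have hdp : d.Pairwise (· ≤ ·) :=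
        ((List.pairwise_cons.1 hs).2).sublist (hd ▸ List.dropWhile_sublist _)
      have hdlt : d.length < (c :: rest).length :=
        Nat.lt_succ_of_le (hd ▸ List.length_dropWhile_le _ _)
      have ihd := ihn d (by have := hdlt; simp at this ⊢; omega) hdp
      rw [show pvRunScan num (c :: rest) =
          (if ((1 + (t.length : Int)) == num) then true else pvRunScan num d) from by
        rw [pvRunScan]]
      constructor
      · intro hres
        by_cases hnum : ((1 + (t.length : Int)) == num) = true
        · refine ⟨c, by simp, ?_⟩
          have hq := beq_iff_eq.1 hnum
          rw [hcount_c]; push_cast at hq ⊢; omega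
        · rw [if_neg hnum] at hres
          obtain ⟨x, hx, hxc⟩ := ihd.1 hres
          refine ⟨x, ?_, ?_⟩
          · rw [← hsplit]; exact List.mem_cons.2 (Or.inr (List.mem_append.2 (Or.inr hx)))
          · rw [hcount_d x hx]; exact hxc
      · rintro ⟨x, hx, hxc⟩
        by_cases hnum : ((1 + (t.length : Int)) == num) = true
        · simp [hnum]
        · rw [if_neg hnum]
          rcases List.mem_cons.1 hx with rfl | hx'
          · exfalso
            rw [hcount_c] at hxc; push_cast at hxc
            exact hnum (by simpa [beq_iff_eq] using hxc)
          · rw [← hsplit] at hx'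
            rcases List.mem_append.1 hx' with hxt | hxd
            · exfalso
              have := hteq x hxt; subst this
              rw [hcount_c] at hxc; push_cast at hxc
              exact hnum (by simpa [beq_iff_eq] using hxc)
            · exact ihd.2 ⟨x, hxd, by rw [← hcount_d x hxd]; exact hxc⟩

theorem pvB_iff (num : Int) (l : List Char) (hs : l.Pairwise (· ≤ ·)) :
    pvRunScan num l = true ↔ ∃ c ∈ l, (l.count c : Int) = num :=
  pvB_iff_aux num l.length l le_rfl hs

-- ===== VERDICT (by name: the statement is the Claim_ definition above) =====
theorem check_for_count_spec : Claim_equal_check_for_count := by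
  intro s num _
  unfold Spec_check_for_count check_for_count_alt
  have hperm : (PySem.List.sorted s.toList (fun x => x) false).Perm s.toList :=
    PySem.List.sorted_perm _ _ _
  have hpw : (PySem.List.sorted s.toList (fun x => x) false).Pairwise (· ≤ ·) := by
    simpa using PySem.List.sorted_pairwise s.toList (fun x => x)
  have hB := pvB_iff num _ hpw
  have hA := pvA_iff s num
  rw [Bool.eq_iff_iff, hA, hB]
  constructor
  · rintro ⟨c, hc, hcc⟩
    exact ⟨c, hperm.mem_iff.2 hc, by rw [hperm.count_eq]; exact hcc⟩
  · rintro ⟨c, hc, hcc⟩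
    exact ⟨c, hperm.mem_iff.1 hc, by rw [← hperm.count_eq]; exact hcc⟩
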